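-- pv_equiv track=rewrite | github.com/iamwrm/runner_grid | run.py | get_id
-- ===== SOURCE A (Python) =====
-- def get_id(args):
--     assert(len(args) == 4)
--     dim_length = 4
--     args = [int(i) for i in args]
--     idx = 0
--     for i, v in enumerate(args[::-1]):
--         idx += v * (dim_length**i)
--     return idx
-- ===== SOURCE B (Python) =====
-- def get_id(args):
--     assert(len(args) == 4)
--     idx = 0
--     for v in args:
--         idx = idx * 4 + int(v)
--     return idx
-- ===== Notes on version B (the rewrite author's own statement) =====
-- stated objective: idiomatic
-- what changed: Horner's method: a forward left-fold idx = idx*4 + v replaces the reversed-list enumeration with per-position exponentiation 4**i.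
import Mathlib
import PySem

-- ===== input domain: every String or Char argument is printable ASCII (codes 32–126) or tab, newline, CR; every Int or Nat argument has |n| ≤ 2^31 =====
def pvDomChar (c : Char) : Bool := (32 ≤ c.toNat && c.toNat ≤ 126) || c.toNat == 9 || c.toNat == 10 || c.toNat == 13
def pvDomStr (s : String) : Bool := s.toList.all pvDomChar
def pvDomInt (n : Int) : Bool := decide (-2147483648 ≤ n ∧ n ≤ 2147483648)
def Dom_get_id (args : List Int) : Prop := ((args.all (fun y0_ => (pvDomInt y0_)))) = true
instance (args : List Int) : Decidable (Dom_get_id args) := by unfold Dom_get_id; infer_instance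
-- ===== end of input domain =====

-- B replaces the reversed enumeration with powers of 4 by a forward Horner fold (idiomatic).


-- ===== PORT A =====
-- assert(len(args)==4) is handled by Pre_; int(i) on an Int is the identity.
def get_id (args : List Int) : Int :=
  (PySem.List.enumerate args.reverse).foldl (fun idx iv => idx + iv.2 * ((4 : Int) ^ iv.1.toNat)) 0

-- ===== PORT B =====
def get_id_alt (args : List Int) : Int :=
  args.foldl (fun idx v => idx * 4 + v) 0

-- ===== PRECONDITION & SPEC =====
-- A raises AssertionError unless the list has exactly 4 elements.
def Pre_get_id (args : List Int) : Prop := args.length = 4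
instance (args : List Int) : Decidable (Pre_get_id args) := by unfold Pre_get_id; infer_instance
def pvWitness_get_id : List Int := [1, 2, 3, 0]
def Spec_get_id (args : List Int) (out : Int) : Prop := out = get_id_alt args
instance (args : List Int) (out : Int) : Decidable (Spec_get_id args out) := by unfold Spec_get_id; infer_instance

-- ===== CLAIM (what is proved, stated in full; the proofs are below) =====
def Claim_equal_get_id : Prop := ∀ (args : List Int), Dom_get_id args → Pre_get_id args → Spec_get_id args (get_id args)

-- ===== LEMMAS AND PROOFS =====

-- ===== VERDICT (by name: the statement is the Claim_ definition above) =====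
theorem get_id_spec : Claim_equal_get_id := by
  intro args _ hpre
  match args, hpre with
  | [a, b, c, d], _ =>
    unfold Spec_get_id get_id get_id_alt
    simp [PySem.List.enumerate_cons, PySem.List.enumerate_nil, List.foldl]
    ring
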